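-- pv_equiv track=rewrite | github.com/unicamp-dl/Lissard | src/repeat_copy_logic/russian.py | x_hello_world_not_say_world_every_even_time
-- ===== SOURCE A (Python) =====
-- def x_hello_world_not_say_world_every_even_time(times):
--     '''
--     'say hello world five times, but don't say world every even time',
--     '''
--     out = ''
--     count = 0
--     for x in range(0, times):
--         if count == 1:
--             out+='привет '
--             count=0
--         else:
--             out+='привет мир '
--             count+=1
--     return out.strip()
-- ===== SOURCE B (Python) =====
-- def x_hello_world_not_say_world_every_even_time(times):
--     # Closed form: the loop emits the two-iteration block 'привет мир привет '
--     # times//2 times, plus one 'привет мир ' for an odd leftover iteration.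
--     n = max(times, 0)
--     return ('привет мир привет ' * (n // 2) + 'привет мир ' * (n % 2)).strip()
-- ===== Notes on version B (the rewrite author's own statement) =====
-- stated objective: simpler
-- what changed: Replaced the per-iteration accumulation loop with its count-toggle state machine by a closed-form string multiplication of the two-iteration block plus an odd-leftover tail.
import Mathlib
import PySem

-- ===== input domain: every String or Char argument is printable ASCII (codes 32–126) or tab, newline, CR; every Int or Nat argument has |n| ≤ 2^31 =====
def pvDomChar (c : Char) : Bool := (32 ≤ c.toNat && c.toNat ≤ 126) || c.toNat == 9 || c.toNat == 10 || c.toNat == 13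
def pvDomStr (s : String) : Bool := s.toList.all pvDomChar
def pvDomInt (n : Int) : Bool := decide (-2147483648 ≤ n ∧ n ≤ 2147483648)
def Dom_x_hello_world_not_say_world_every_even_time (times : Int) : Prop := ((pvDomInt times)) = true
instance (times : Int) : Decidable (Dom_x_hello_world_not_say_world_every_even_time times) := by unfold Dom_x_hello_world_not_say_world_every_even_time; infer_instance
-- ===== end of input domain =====

-- B replaces A's per-iteration accumulation loop (with a count-toggle state machine)
-- by a closed-form repetition of the two-iteration block; objective: simpler.

-- ===== PORT A =====
def x_hello_world_not_say_world_every_even_time (times : Int) : String :=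
  let s :=
    (PySem.List.pyRange 0 times 1).foldl
      (fun (s : String × Int) _ =>
        if s.2 == 1 then (s.1 ++ "привет ", 0)
        else (s.1 ++ "привет мир ", s.2 + 1))
      ("", 0)
  PySem.Str.strip s.1

-- ===== PORT B =====
-- Python 's * k' (empty for k ≤ 0)
def pvRepeat (s : String) : Nat → String
  | 0 => ""
  | n+1 => s ++ pvRepeat s n

def pvStrMul (s : String) (k : Int) : String :=
  pvRepeat s k.toNat

def x_hello_world_not_say_world_every_even_time_alt (times : Int) : String :=
  let n := max times 0
  PySem.Str.strip
    (pvStrMul "привет мир привет " (PySem.Int.floordiv n 2) ++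
     pvStrMul "привет мир " (PySem.Int.mod n 2))

-- ===== PRECONDITION & SPEC =====
def Spec_x_hello_world_not_say_world_every_even_time (times : Int) (out : String) : Prop := out = x_hello_world_not_say_world_every_even_time_alt times
instance (times : Int) (out : String) : Decidable (Spec_x_hello_world_not_say_world_every_even_time times out) := by unfold Spec_x_hello_world_not_say_world_every_even_time; infer_instance

-- ===== CLAIM (what is proved, stated in full; the proofs are below) =====
def Claim_equal_x_hello_world_not_say_world_every_even_time : Prop := ∀ (times : Int), Dom_x_hello_world_not_say_world_every_even_time times → Spec_x_hello_world_not_say_world_every_even_time times (x_hello_world_not_say_world_every_even_time times)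

-- ===== LEMMAS AND PROOFS =====

-- A's loop body (ignores the range element)
def pvStep (s : String × Int) : String × Int :=
  if s.2 == 1 then (s.1 ++ "привет ", 0)
  else (s.1 ++ "привет мир ", s.2 + 1)

def pvIter : Nat → (String × Int) → (String × Int)
  | 0, s => s
  | k+1, s => pvIter k (pvStep s)

theorem pv_foldl_const (l : List Int) (s : String × Int) :
    l.foldl (fun s _ => pvStep s) s = pvIter l.length s := by
  induction l generalizing s with
  | nil => rfl
  | cons x xs ih => simpa [pvIter] using ih (pvStep s)

theorem pv_iter_closed (n : Nat) : ∀ (out : String),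
    (pvIter n (out, 0)).1 =
      out ++ (pvRepeat "привет мир привет " (n / 2) ++ pvRepeat "привет мир " (n % 2)) := by
  induction n using Nat.strong_induction_on with
  | _ n ih =>
    match n with
    | 0 => intro out; simp [pvIter, pvRepeat]
    | 1 => intro out; simp [pvIter, pvStep, pvRepeat]
    | (m+2) =>
      intro out
      have h := ih m (by omega) (out ++ "привет мир привет ")
      simp only [pvIter, pvStep] at h ⊢
      norm_num at h ⊢
      have hs : out ++ "привет мир " ++ "привет " = out ++ "привет мир привет " := by
        rw [String.append_assoc]; rfl
      rw [hs, h]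
      simp [pvRepeat, String.append_assoc]

theorem x_hello_world_not_say_world_every_even_time_spec : Claim_equal_x_hello_world_not_say_world_every_even_time := by
  intro times _
  unfold Spec_x_hello_world_not_say_world_every_even_time
  unfold x_hello_world_not_say_world_every_even_time x_hello_world_not_say_world_every_even_time_alt
  simp only []
  have hfold := pv_foldl_const (PySem.List.pyRange 0 times 1) ("", 0)
  have hlen : (PySem.List.pyRange 0 times 1).length = times.toNat := by
    simp [PySem.List.length_pyRange_one]
  have hmax : max times 0 = (times.toNat : Int) := by omega
  have hfd : PySem.Int.floordiv (max times 0) 2 = ((times.toNat / 2 : Nat) : Int) := by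
    rw [hmax]; exact_mod_cast PySem.Int.floordiv_natCast times.toNat 2
  have hmod : PySem.Int.mod (max times 0) 2 = ((times.toNat % 2 : Nat) : Int) := by
    rw [hmax]; exact_mod_cast PySem.Int.mod_natCast times.toNat 2
  have hclosed := pv_iter_closed times.toNat ""
  simp only [pvStep] at hfold
  rw [hfold, hlen, hfd, hmod]
  unfold pvStrMul
  simp only [Int.toNat_natCast]
  rw [hclosed]
  simp
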